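-- pv_equiv track=rewrite | github.com/jeffmatskin/CourseraAlgorithms | Algorithms2/graphSearch.py | undirected
-- ===== SOURCE A (Python) =====
-- def reverse_graph(g):
--     rev_graph = {}
--     for v in g.keys():
--         for w in g[v]:
--             if w in rev_graph:
--                 rev_graph[w].append(v)
--             else:
--                 rev_graph[w] = [v]
--     for i in g.keys():
--         if i not in rev_graph.keys():
--             rev_graph[i] = []
--     return rev_graph
--
-- def undirected(g):
--     h = reverse_graph(g)
--     undir_graph = {}
--     for v in g.keys():
--         for w in g[v]:
--             if v in undir_graph.keys():
--                 undir_graph[v].append(w)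
--             else:
--                 undir_graph[v] = [w]
--
--     for v in h.keys():
--         for w in h[v]:
--             if v in undir_graph.keys():
--                 undir_graph[v].append(w)
--             else:
--                 undir_graph[v]=[w]
--
--     return undir_graph
-- ===== SOURCE B (Python) =====
-- def undirected(g):
--     # Gather formulation: compute the output key order first (sources with edges,
--     # then targets in first-encounter order), then build each adjacency list by a
--     # per-key gather over g's edges -- no intermediate scatter dict at all.
--     keys = [v for v, ws in g.items() if ws]
--     for ws in g.values():
--         for w in ws:
--             if w not in keys:
--                 keys.append(w)
--     return {k: g.get(k, []) + [v for v, ws in g.items() for x in ws if x == k]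
--             for k in keys}
-- ===== Notes on version B (the rewrite author's own statement) =====
-- stated objective: alternative
-- what changed: B replaces A's scatter-into-dicts algorithm (build a reverse-graph table, then append edges into the result dict entry by entry) with a gather algorithm: it first computes the output key order, then builds each key's adjacency list directly by one comprehension over g's edges; it trades A's O(V+E) scatter for a per-key scan.
import Mathlib
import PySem

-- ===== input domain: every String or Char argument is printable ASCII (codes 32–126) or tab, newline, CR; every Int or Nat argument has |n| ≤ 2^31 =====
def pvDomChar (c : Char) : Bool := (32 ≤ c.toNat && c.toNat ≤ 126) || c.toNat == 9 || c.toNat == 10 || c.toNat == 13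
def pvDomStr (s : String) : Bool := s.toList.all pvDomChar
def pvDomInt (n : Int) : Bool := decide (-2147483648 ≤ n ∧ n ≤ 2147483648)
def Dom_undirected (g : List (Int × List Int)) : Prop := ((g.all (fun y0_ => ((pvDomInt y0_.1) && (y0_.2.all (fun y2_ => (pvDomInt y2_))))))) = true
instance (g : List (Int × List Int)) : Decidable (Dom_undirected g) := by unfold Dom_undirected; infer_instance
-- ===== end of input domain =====

-- B replaces A's scatter-into-dicts construction by a gather algorithm: compute the
-- output key order first, then build each adjacency list by a per-key scan of g's edges
-- (objective: alternative; B trades the scatter for a per-key gather).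


-- ===== PORT A =====
-- A: reverse_graph builds h (in-neighbour lists, padded with [] for vertices without
-- in-edges); undirected scatters g's lists, then h's lists, into undir_graph.
-- Under Pre_ (no duplicate keys) the Python dict g has exactly the items of the list.
def undirected (g : List (Int × List Int)) : List (Int × List Int) :=
  let gd : PySem.Dict Int (List Int) := PySem.Dict.mk g
  -- reverse_graph g
  let rev1 : PySem.Dict Int (List Int) :=
    gd.keys.foldl (fun rev v =>
      (gd.getD v []).foldl (fun rev w =>
        if rev.contains w then rev.modify w [] (· ++ [v]) else rev.insert w [v]) rev)
      PySem.Dict.empty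
  let h : PySem.Dict Int (List Int) :=
    gd.keys.foldl (fun rev i => if rev.contains i then rev else rev.insert i []) rev1
  -- undirected g
  let u1 : PySem.Dict Int (List Int) :=
    gd.keys.foldl (fun u v =>
      (gd.getD v []).foldl (fun u w =>
        if u.contains v then u.modify v [] (· ++ [w]) else u.insert v [w]) u)
      PySem.Dict.empty
  let u2 : PySem.Dict Int (List Int) :=
    h.keys.foldl (fun u v =>
      (h.getD v []).foldl (fun u w =>
        if u.contains v then u.modify v [] (· ++ [w]) else u.insert v [w]) u)
      u1
  u2.items

-- ===== PORT B =====
-- B: gather. keys = [v for v, ws in g.items() if ws], extended by unseen targets in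
-- first-encounter order; then one dict comprehension builds each list by gathering.
def undirected_alt (g : List (Int × List Int)) : List (Int × List Int) :=
  let gd : PySem.Dict Int (List Int) := PySem.Dict.mk g
  let keys0 : List Int := (g.filter (fun p => p.2 ≠ [])).map Prod.fst
  let keys : List Int :=
    g.foldl (fun ks p => p.2.foldl (fun ks w => if w ∈ ks then ks else ks ++ [w]) ks) keys0
  keys.map (fun k => (k, gd.getD k [] ++
    g.flatMap (fun p => (p.2.filter (fun x => x = k)).map (fun _ => p.1))))

-- ===== PRECONDITION & SPEC =====
-- Pre_ excludes association lists with duplicate keys: those do not denote the Python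
-- dict argument faithfully (dict construction collapses duplicates, last value wins).
def Pre_undirected (g : List (Int × List Int)) : Prop := (g.map Prod.fst).Nodup
instance (g : List (Int × List Int)) : Decidable (Pre_undirected g) := by unfold Pre_undirected; infer_instance

def pvWitness_undirected : (List (Int × List Int)) := [(1, [2, 3]), (2, [3]), (4, [])]

def Spec_undirected (g : List (Int × List Int)) (out : List (Int × List Int)) : Prop := out = undirected_alt g
instance (g : List (Int × List Int)) (out : List (Int × List Int)) : Decidable (Spec_undirected g out) := by unfold Spec_undirected; infer_instance

-- ===== CLAIM (what is proved, stated in full; the proofs are below) =====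
def Claim_equal_undirected : Prop := ∀ (g : List (Int × List Int)), Dom_undirected g → Pre_undirected g → Spec_undirected g (undirected g)

-- ===== LEMMAS AND PROOFS =====

-- Raw (items-level) model of A's scatter: rawAdd1 d k w appends w to the first entry
-- keyed k, or appends a fresh entry (k, [w]).
def rawAdd1 : List (Int × List Int) → Int → Int → List (Int × List Int)
  | [], k, w => [(k, [w])]
  | p :: d, k, w => if p.1 = k then (p.1, p.2 ++ [w]) :: d else p :: rawAdd1 d k w

def rawScatter (d : List (Int × List Int)) (es : List (Int × Int)) : List (Int × List Int) :=
  es.foldl (fun d e => rawAdd1 d e.1 e.2) d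

def flat (h : List (Int × List Int)) : List (Int × Int) :=
  h.flatMap (fun p => p.2.map (fun w => (p.1, w)))

-- Gather model of B: output keys in first-encounter order, values by filtering.
def fkeys (acc : List Int) (es : List (Int × Int)) : List Int :=
  es.foldl (fun ks e => if e.1 ∈ ks then ks else ks ++ [e.1]) acc

def egroup (es : List (Int × Int)) (k : Int) : List Int :=
  (es.filter (fun e => e.1 = k)).map Prod.snd

theorem keys_rawAdd1 (d : List (Int × List Int)) (k w : Int) :
    (rawAdd1 d k w).map Prod.fst =
      if k ∈ d.map Prod.fst then d.map Prod.fst else d.map Prod.fst ++ [k] := by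
  induction d with
  | nil => simp [rawAdd1]
  | cons p d ih =>
    by_cases hpk : p.1 = k <;> simp only [rawAdd1, hpk, if_true, if_false, List.map_cons, ih]
    · simp
    · by_cases hk : k ∈ d.map Prod.fst <;>
        simp [hk, Ne.symm hpk]

theorem nodup_keys_rawAdd1 (d : List (Int × List Int)) (k w : Int)
    (h : (d.map Prod.fst).Nodup) : ((rawAdd1 d k w).map Prod.fst).Nodup := by
  rw [keys_rawAdd1]; split
  · exact h
  · next hk =>
      refine List.Nodup.append h (List.nodup_singleton k) ?_
      intro a ha hb
      simp at hb; subst hb; exact hk ha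

theorem mem_keys_rawAdd1_self (d : List (Int × List Int)) (k w : Int) :
    k ∈ (rawAdd1 d k w).map Prod.fst := by
  rw [keys_rawAdd1]; split <;> simp_all

theorem mem_keys_rawAdd1_mono (d : List (Int × List Int)) (k w j : Int)
    (h : j ∈ d.map Prod.fst) : j ∈ (rawAdd1 d k w).map Prod.fst := by
  rw [keys_rawAdd1]; split <;> simp_all

theorem rawAdd1_of_not_mem (d : List (Int × List Int)) (k w : Int)
    (h : k ∉ d.map Prod.fst) : rawAdd1 d k w = d ++ [(k, [w])] := by
  induction d with
  | nil => simp [rawAdd1]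
  | cons p d ih => simp_all [rawAdd1]; intro hc; simp [hc] at h

theorem snd_ne_nil_rawAdd1 (d : List (Int × List Int)) (k w : Int)
    (h : ∀ p ∈ d, p.2 ≠ []) : ∀ p ∈ rawAdd1 d k w, p.2 ≠ [] := by
  induction d with
  | nil => simp [rawAdd1]
  | cons q d ih =>
    by_cases hq : q.1 = k <;> simp_all [rawAdd1] <;> aesop

theorem rawAdd1_comm (d : List (Int × List Int)) (j k v w : Int) (hjk : j ≠ k)
    (hk : k ∈ d.map Prod.fst) :
    rawAdd1 (rawAdd1 d j w) k v = rawAdd1 (rawAdd1 d k v) j w := by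
  induction d with
  | nil => simp at hk
  | cons p d ih =>
    by_cases hpj : p.1 = j
    · have hpk : ¬ p.1 = k := by rw [hpj]; exact hjk
      simp [rawAdd1, hpj, hjk]
    · by_cases hpk : p.1 = k
      · simp [rawAdd1, hpk, Ne.symm hjk]
      · have hk' : k ∈ d.map Prod.fst := by
          simp only [List.map_cons, List.mem_cons] at hk
          rcases hk with h | h
          · exact absurd h.symm hpk
          · exact h
        simp only [rawAdd1, hpj, hpk, if_false]
        rw [ih hk']

theorem rawScatter_comm (es : List (Int × Int)) (d : List (Int × List Int)) (k v : Int)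
    (hes : ∀ e ∈ es, e.1 ≠ k) (hk : k ∈ d.map Prod.fst) :
    rawScatter (rawAdd1 d k v) es = rawAdd1 (rawScatter d es) k v := by
  induction es generalizing d with
  | nil => rfl
  | cons e es ih =>
    have h1 : e.1 ≠ k := hes e (by simp)
    show rawScatter (rawAdd1 (rawAdd1 d k v) e.1 e.2) es
        = rawAdd1 (rawScatter (rawAdd1 d e.1 e.2) es) k v
    rw [← rawAdd1_comm d e.1 k v e.2 h1 hk]
    exact ih (rawAdd1 d e.1 e.2) (fun e' he' => hes e' (by simp [he']))
      (mem_keys_rawAdd1_mono d e.1 e.2 k hk)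

theorem rawScatter_append (d : List (Int × List Int)) (es es' : List (Int × Int)) :
    rawScatter d (es ++ es') = rawScatter (rawScatter d es) es' :=
  List.foldl_append

theorem mem_keys_rawScatter_selfgroup (d : List (Int × List Int)) (k : Int)
    (l : List Int) (hl : l ≠ []) :
    k ∈ (rawScatter d (l.map (fun w => (k, w)))).map Prod.fst := by
  induction l generalizing d with
  | nil => exact absurd rfl hl
  | cons x xs ih =>
    rcases xs with _ | ⟨y, ys⟩
    · exact mem_keys_rawAdd1_self d k x
    · exact ih (rawAdd1 d k x) (by simp)

theorem flat_key_mem (h : List (Int × List Int)) (e : Int × Int) (he : e ∈ flat h) :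
    e.1 ∈ h.map Prod.fst := by
  simp [flat] at he
  obtain ⟨a, b, hab, w, _, hw⟩ := he
  subst hw; simpa using ⟨b, hab⟩

-- CORE: appending one reverse edge (k, v) commutes with grouping.
theorem core_step (h : List (Int × List Int)) (d : List (Int × List Int)) (k v : Int)
    (hne : ∀ p ∈ h, p.2 ≠ []) (hnd : (h.map Prod.fst).Nodup) :
    rawAdd1 (rawScatter d (flat h)) k v = rawScatter d (flat (rawAdd1 h k v)) := by
  induction h generalizing d with
  | nil => rfl
  | cons p h' ih =>
    by_cases hpk : p.1 = k
    · subst hpk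
      have hflat : flat (rawAdd1 (p :: h') p.1 v)
          = (p.2.map (fun w => (p.1, w)) ++ [(p.1, v)]) ++ flat h' := by
        simp [rawAdd1, flat]
      rw [hflat, rawScatter_append, rawScatter_append]
      have hd : flat (p :: h') = p.2.map (fun w => (p.1, w)) ++ flat h' := by simp [flat]
      rw [hd, rawScatter_append]
      have hkd : p.1 ∈ (rawScatter d (p.2.map (fun w => (p.1, w)))).map Prod.fst :=
        mem_keys_rawScatter_selfgroup d p.1 p.2 (hne p (by simp))
      rw [List.map_cons, List.nodup_cons] at hnd
      have hknot : ∀ e ∈ flat h', e.1 ≠ p.1 := by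
        intro e he heq
        exact hnd.1 (heq ▸ flat_key_mem h' e he)
      rw [← rawScatter_comm (flat h') _ p.1 v hknot hkd]
      rfl
    · have hflat : flat (rawAdd1 (p :: h') k v)
          = p.2.map (fun w => (p.1, w)) ++ flat (rawAdd1 h' k v) := by
        simp [rawAdd1, hpk, flat]
      have hd : flat (p :: h') = p.2.map (fun w => (p.1, w)) ++ flat h' := by simp [flat]
      rw [hflat, hd, rawScatter_append, rawScatter_append]
      rw [List.map_cons, List.nodup_cons] at hnd
      exact ih _ (fun q hq => hne q (by simp [hq])) hnd.2

-- MAIN (A-side): scattering edges equals scattering the flattened grouping of those edges.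
theorem scatter_group (es : List (Int × Int)) (h : List (Int × List Int))
    (d : List (Int × List Int)) (hne : ∀ p ∈ h, p.2 ≠ []) (hnd : (h.map Prod.fst).Nodup) :
    rawScatter (rawScatter d (flat h)) es = rawScatter d (flat (rawScatter h es)) := by
  induction es generalizing h with
  | nil => rfl
  | cons e es ih =>
    show rawScatter (rawScatter (rawScatter d (flat h)) [e]) es
        = rawScatter d (flat (rawScatter (rawAdd1 h e.1 e.2) es))
    have h1 : rawScatter (rawScatter d (flat h)) [e]
        = rawAdd1 (rawScatter d (flat h)) e.1 e.2 := rfl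
    rw [h1, core_step h d e.1 e.2 hne hnd]
    exact ih (rawAdd1 h e.1 e.2) (snd_ne_nil_rawAdd1 h e.1 e.2 hne)
      (nodup_keys_rawAdd1 h e.1 e.2 hnd)

-- ---- Bridge: Dict-level steps compute rawAdd1 on .items ----

theorem map_replace_id (d : List (Int × List Int)) (k : Int) (x : List Int)
    (h : k ∉ d.map Prod.fst) :
    d.map (fun p => if p.1 = k then (k, x) else p) = d := by
  induction d with
  | nil => rfl
  | cons p d ih => simp_all; intro hc; simp [hc] at h

theorem stepA_items (u : PySem.Dict Int (List Int)) (k w : Int) (hnd : u.keys.Nodup) :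
    (if u.contains k then u.modify k [] (· ++ [w]) else u.insert k [w]).items
      = rawAdd1 u.items k w := by
  by_cases hc : u.contains k = true
  · simp only [hc, if_true]
    have hmem : k ∈ u.items.map Prod.fst := by
      have := (PySem.Dict.contains_iff_mem_keys u k).mp hc
      simpa [PySem.Dict.keys] using this
    rw [show u.modify k [] (· ++ [w]) = u.insert k (u.getD k [] ++ [w]) from rfl]
    rw [PySem.Dict.items_insert_of_contains _ _ hc]
    have hkeys : (u.items.map Prod.fst).Nodup := by simpa [PySem.Dict.keys] using hnd
    have : ∀ (l : List (Int × List Int)), (l.map Prod.fst).Nodup → k ∈ l.map Prod.fst →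
        l.map (fun p => if (p.1 == k) = true then (k, (PySem.Dict.mk l).getD k [] ++ [w]) else p)
          = rawAdd1 l k w := by
      intro l
      induction l with
      | nil => simp
      | cons p l ih =>
        intro hndl hkl
        by_cases hpk : p.1 = k
        · have hval : (PySem.Dict.mk (p :: l)).getD k [] = p.2 := by
            simp [PySem.Dict.getD, PySem.Dict.get?, List.find?, hpk]
          have hknl : k ∉ l.map Prod.fst := by
            rw [List.map_cons, List.nodup_cons] at hndl
            exact hpk ▸ hndl.1
          have hmap : l.map (fun q => if (q.1 == k) = true then (k, p.2 ++ [w]) else q) = l := by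
            simpa [beq_iff_eq] using map_replace_id l k (p.2 ++ [w]) hknl
          simp only [List.map_cons, hpk, beq_self_eq_true, if_true, hval, hmap]
          simp [rawAdd1, hpk]
        · have hb : (p.1 == k) = false := by simp [hpk]
          have hg : (PySem.Dict.mk (p :: l)).getD k [] = (PySem.Dict.mk l).getD k [] := by
            simp [PySem.Dict.getD, PySem.Dict.get?, hb, List.find?]
          have hkl' : k ∈ l.map Prod.fst := by
            rw [List.map_cons, List.mem_cons] at hkl
            rcases hkl with h | h
            · exact absurd h.symm hpk
            · exact h
          rw [List.map_cons, List.nodup_cons] at hndl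
          simp only [List.map_cons, hb, if_false, rawAdd1, hpk]
          rw [hg, ih hndl.2 hkl']
          simp
    have hit : u = PySem.Dict.mk u.items := rfl
    calc u.items.map (fun p => if (p.1 == k) = true then (k, u.getD k [] ++ [w]) else p)
        = u.items.map (fun p => if (p.1 == k) = true then (k, (PySem.Dict.mk u.items).getD k [] ++ [w]) else p) := by rw [← hit]
      _ = rawAdd1 u.items k w := this u.items hkeys hmem
  · simp only [hc, Bool.false_eq_true, if_false]
    have hnm : k ∉ u.items.map Prod.fst := by
      intro hx
      exact hc ((PySem.Dict.contains_iff_mem_keys u k).mpr (by simpa [PySem.Dict.keys] using hx))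
    rw [PySem.Dict.items_insert_of_not_contains _ _ (by simpa using hc),
        rawAdd1_of_not_mem _ _ _ hnm]

theorem stepA_nodup (u : PySem.Dict Int (List Int)) (k w : Int) (hnd : u.keys.Nodup) :
    (if u.contains k then u.modify k [] (· ++ [w]) else u.insert k [w]).keys.Nodup := by
  have h1 : (if u.contains k then u.modify k [] (· ++ [w]) else u.insert k [w]).keys
      = (rawAdd1 u.items k w).map Prod.fst := by
    simp only [PySem.Dict.keys, stepA_items u k w hnd]
  rw [h1]
  exact nodup_keys_rawAdd1 _ _ _ (by simpa [PySem.Dict.keys] using hnd)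

-- inner loop bridge (fixed outer key, mk chooses where key/value go)
theorem inner_bridge (ws : List Int) (mk : Int → Int × Int)
    (u : PySem.Dict Int (List Int)) (hnd : u.keys.Nodup) :
    (ws.foldl (fun u w =>
        if u.contains (mk w).1 then u.modify (mk w).1 [] (· ++ [(mk w).2])
        else u.insert (mk w).1 [(mk w).2]) u).items
      = rawScatter u.items (ws.map mk)
    ∧ (ws.foldl (fun u w =>
        if u.contains (mk w).1 then u.modify (mk w).1 [] (· ++ [(mk w).2])
        else u.insert (mk w).1 [(mk w).2]) u).keys.Nodup := by
  induction ws generalizing u with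
  | nil => exact ⟨rfl, hnd⟩
  | cons w ws ih =>
    have hstep := stepA_items u (mk w).1 (mk w).2 hnd
    have hstepnd := stepA_nodup u (mk w).1 (mk w).2 hnd
    have := ih (if u.contains (mk w).1 then u.modify (mk w).1 [] (· ++ [(mk w).2])
        else u.insert (mk w).1 [(mk w).2]) hstepnd
    refine ⟨?_, this.2⟩
    rw [List.foldl_cons, this.1, hstep]
    rfl

-- nested loop bridge over a (key, neighbour-list) list
theorem nested_bridge (l : List (Int × List Int)) (mk : Int → Int → Int × Int)
    (u : PySem.Dict Int (List Int)) (hnd : u.keys.Nodup) :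
    (l.foldl (fun u p =>
        p.2.foldl (fun u w =>
          if u.contains (mk p.1 w).1 then u.modify (mk p.1 w).1 [] (· ++ [(mk p.1 w).2])
          else u.insert (mk p.1 w).1 [(mk p.1 w).2]) u) u).items
      = rawScatter u.items (l.flatMap (fun p => p.2.map (mk p.1)))
    ∧ (l.foldl (fun u p =>
        p.2.foldl (fun u w =>
          if u.contains (mk p.1 w).1 then u.modify (mk p.1 w).1 [] (· ++ [(mk p.1 w).2])
          else u.insert (mk p.1 w).1 [(mk p.1 w).2]) u) u).keys.Nodup := by
  induction l generalizing u with
  | nil => exact ⟨rfl, hnd⟩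
  | cons p l ih =>
    have hin := inner_bridge p.2 (mk p.1) u hnd
    have := ih _ hin.2
    refine ⟨?_, this.2⟩
    rw [List.foldl_cons, this.1, hin.1]
    simp [rawScatter_append]

-- keys-fold with subscript = items-fold (needs Nodup keys)
theorem keysfold {β : Type} (d : PySem.Dict Int (List Int)) (hnd : d.keys.Nodup)
    (F : β → Int → List Int → β) (init : β) :
    d.keys.foldl (fun acc v => F acc v (d.getD v [])) init
      = d.items.foldl (fun acc p => F acc p.1 p.2) init := by
  have hkeys : d.keys = d.items.map Prod.fst := rfl
  rw [hkeys, List.foldl_map]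
  have hnd' : d.keys.Nodup := hnd
  have : ∀ (l : List (Int × List Int)) (init : β), (∀ p ∈ l, d.getD p.1 [] = p.2) →
      l.foldl (fun acc p => F acc p.1 (d.getD p.1 [])) init
        = l.foldl (fun acc p => F acc p.1 p.2) init := by
    intro l
    induction l with
    | nil => intro _ _; rfl
    | cons p l ih =>
      intro init hall
      simp only [List.foldl_cons, hall p (by simp)]
      exact ih _ (fun q hq => hall q (by simp [hq]))
  exact this d.items init (fun p hp => PySem.Dict.getD_of_mem_items d (by simpa using hp) hnd' [])

-- padding with empty lists changes neither key-nodup nor the flattened edge list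
theorem pad_bridge (ks : List Int) (r : PySem.Dict Int (List Int)) (hnd : r.keys.Nodup) :
    (ks.foldl (fun r i => if r.contains i then r else r.insert i []) r).keys.Nodup
    ∧ flat (ks.foldl (fun r i => if r.contains i then r else r.insert i []) r).items
        = flat r.items := by
  induction ks generalizing r with
  | nil => exact ⟨hnd, rfl⟩
  | cons i ks ih =>
    by_cases hc : r.contains i = true
    · simpa [List.foldl_cons, hc] using ih r hnd
    · have hkeys : (r.insert i []).keys.Nodup := by
        rw [PySem.Dict.keys_insert_of_not_contains _ _ (by simpa using hc)]
        refine List.Nodup.append hnd (List.nodup_singleton i) ?_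
        intro a ha hb
        simp at hb
        exact hc ((PySem.Dict.contains_iff_mem_keys r i).mpr (hb ▸ ha))
      have hflat : flat (r.insert i []).items = flat r.items := by
        rw [PySem.Dict.items_insert_of_not_contains _ _ (by simpa using hc)]
        simp [flat]
      have := ih (r.insert i []) hkeys
      simp only [List.foldl_cons, hc, Bool.false_eq_true, if_false]
      exact ⟨this.1, by rw [this.2, hflat]⟩

-- ---- Gather side (B): rawScatter = map over first-encounter keys of the groups ----

theorem mem_fkeys (es : List (Int × Int)) (acc : List Int) (j : Int) :
    j ∈ fkeys acc es ↔ j ∈ acc ∨ j ∈ es.map Prod.fst := by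
  induction es generalizing acc with
  | nil => simp [fkeys]
  | cons e es ih =>
    show j ∈ fkeys (if e.1 ∈ acc then acc else acc ++ [e.1]) es ↔ _
    rw [ih]
    by_cases he : e.1 ∈ acc <;> simp [he] <;> aesop

theorem nodup_fkeys (es : List (Int × Int)) (acc : List Int) (h : acc.Nodup) :
    (fkeys acc es).Nodup := by
  induction es generalizing acc with
  | nil => exact h
  | cons e es ih =>
    show (fkeys (if e.1 ∈ acc then acc else acc ++ [e.1]) es).Nodup
    by_cases he : e.1 ∈ acc
    · simpa [he] using ih acc h
    · simp only [he, if_false]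
      exact ih _ (by
        refine List.Nodup.append h (List.nodup_singleton _) ?_
        intro a ha hb; simp at hb; subst hb; exact he ha)

theorem fkeys_append (acc : List Int) (es es' : List (Int × Int)) :
    fkeys acc (es ++ es') = fkeys (fkeys acc es) es' :=
  List.foldl_append

theorem egroup_append (es es' : List (Int × Int)) (k : Int) :
    egroup (es ++ es') k = egroup es k ++ egroup es' k := by
  simp [egroup, List.filter_append]

theorem egroup_nil_of_not_mem (es : List (Int × Int)) (k : Int)
    (h : k ∉ es.map Prod.fst) : egroup es k = [] := by
  simp only [egroup, List.map_eq_nil_iff, List.filter_eq_nil_iff]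
  intro e he hk
  exact h (List.mem_map.mpr ⟨e, he, of_decide_eq_true hk⟩)

theorem rawAdd1_map (ks : List Int) (f : Int → List Int) (j v : Int) (hnd : ks.Nodup) :
    rawAdd1 (ks.map (fun k => (k, f k))) j v =
      if j ∈ ks then ks.map (fun k => (k, if k = j then f k ++ [v] else f k))
      else ks.map (fun k => (k, f k)) ++ [(j, [v])] := by
  induction ks with
  | nil => simp [rawAdd1]
  | cons a ks ih =>
    rw [List.nodup_cons] at hnd
    by_cases haj : a = j
    · have hmap : ks.map (fun k => (k, if k = j then f k ++ [v] else f k))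
          = ks.map (fun k => (k, f k)) :=
        List.map_congr_left (fun k hk => by
          have hkj : k ≠ j := fun h => hnd.1 (haj ▸ h ▸ hk)
          simp [hkj])
      simp [rawAdd1, haj, hmap]
    · simp only [List.map_cons, rawAdd1, haj, if_false, ih hnd.2]
      by_cases hj : j ∈ ks <;> simp [hj, Ne.symm haj]

-- rawScatter from empty = gather over first-encounter keys
theorem gather_scatter (es : List (Int × Int)) :
    rawScatter [] es = (fkeys [] es).map (fun k => (k, egroup es k)) := by
  induction es using List.reverseRecOn with
  | nil => rfl
  | append_singleton es e ih =>
    rw [rawScatter_append, fkeys_append]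
    have hone : rawScatter (rawScatter [] es) [e] = rawAdd1 (rawScatter [] es) e.1 e.2 := rfl
    rw [hone, ih, rawAdd1_map _ _ _ _ (nodup_fkeys es [] List.nodup_nil)]
    have hfe : fkeys (fkeys [] es) [e]
        = if e.1 ∈ fkeys [] es then fkeys [] es else fkeys [] es ++ [e.1] := rfl
    rw [hfe]
    by_cases he : e.1 ∈ fkeys [] es
    · simp only [he, if_true]
      refine List.map_congr_left (fun k _ => ?_)
      by_cases hk : k = e.1
      · subst hk; simp [egroup_append, egroup]
      · simp [hk, egroup_append, egroup, Ne.symm hk]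
    · simp only [he, if_false, List.map_append]
      congr 1
      · refine List.map_congr_left (fun k hk => ?_)
        have hk' : k ≠ e.1 := fun h => he (h ▸ hk)
        simp [egroup_append, egroup, hk', Ne.symm hk']
      · have hnil : egroup es e.1 = [] := by
          refine egroup_nil_of_not_mem es e.1 (fun h => he ?_)
          rw [mem_fkeys]; exact Or.inr h
        simp only [List.map_cons, List.map_nil]
        rw [egroup_append, hnil]
        simp [egroup]

-- fkeys over one constant-key block
theorem fkeys_block (acc : List Int) (k : Int) (l : List Int) :
    fkeys acc (l.map (fun w => (k, w))) =
      if l = [] ∨ k ∈ acc then acc else acc ++ [k] := by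
  induction l generalizing acc with
  | nil => simp [fkeys]
  | cons x xs ih =>
    show fkeys (if k ∈ acc then acc else acc ++ [k]) (xs.map (fun w => (k, w))) = _
    by_cases hk : k ∈ acc
    · simp [hk, ih, hk]
    · simp only [hk, if_false, ih]
      simp [hk]

-- fkeys over the forward edge stream of g = sources with nonempty lists, appended
theorem fkeys_flat (g : List (Int × List Int)) (acc : List Int)
    (hnd : (g.map Prod.fst).Nodup) (hdisj : ∀ p ∈ g, p.1 ∉ acc) :
    fkeys acc (flat g) = acc ++ (g.filter (fun p => p.2 ≠ [])).map Prod.fst := by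
  induction g generalizing acc with
  | nil => simp [fkeys, flat]
  | cons p g ih =>
    rw [List.map_cons, List.nodup_cons] at hnd
    have hstep : flat (p :: g) = p.2.map (fun w => (p.1, w)) ++ flat g := by simp [flat]
    rw [hstep, fkeys_append, fkeys_block]
    have hpa : p.1 ∉ acc := hdisj p (by simp)
    by_cases hnil : p.2 = []
    · simp only [hnil, true_or, if_true]
      rw [ih acc hnd.2 (fun q hq => hdisj q (by simp [hq]))]
      simp [hnil]
    · simp only [hnil, hpa, false_or, if_false]
      rw [ih (acc ++ [p.1]) hnd.2 (fun q hq => by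
        simp only [List.mem_append, List.mem_singleton]
        rintro (h | h)
        · exact hdisj q (by simp [hq]) h
        · exact hnd.1 (h ▸ List.mem_map.mpr ⟨q, hq, rfl⟩))]
      simp [hnil]

-- the reverse edge stream of g
def rflat (g : List (Int × List Int)) : List (Int × Int) :=
  g.flatMap (fun p => p.2.map (fun w => (w, p.1)))

-- B's key loop = fkeys over the reverse edge stream
theorem bkeys_fkeys (g : List (Int × List Int)) (acc : List Int) :
    g.foldl (fun ks p => p.2.foldl (fun ks w => if w ∈ ks then ks else ks ++ [w]) ks) acc
      = fkeys acc (rflat g) := by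
  induction g generalizing acc with
  | nil => rfl
  | cons p g ih =>
    have hstep : rflat (p :: g) = p.2.map (fun w => (w, p.1)) ++ rflat g := by simp [rflat]
    rw [hstep, fkeys_append, List.foldl_cons, ih]
    congr 1
    show p.2.foldl (fun ks w => if w ∈ ks then ks else ks ++ [w]) acc
        = (p.2.map (fun w => (w, p.1))).foldl (fun ks e => if e.1 ∈ ks then ks else ks ++ [e.1]) acc
    rw [List.foldl_map]

-- egroup of the forward stream = dict lookup (nodup keys)
theorem egroup_flat (g : List (Int × List Int)) (k : Int) (hnd : (g.map Prod.fst).Nodup) :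
    egroup (flat g) k = (PySem.Dict.mk g).getD k [] := by
  induction g with
  | nil => simp [flat, egroup, PySem.Dict.getD, PySem.Dict.get?, PySem.Dict.mk]
  | cons p g ih =>
    rw [List.map_cons, List.nodup_cons] at hnd
    have hstep : flat (p :: g) = p.2.map (fun w => (p.1, w)) ++ flat g := by simp [flat]
    rw [hstep, egroup_append]
    have hblock : egroup (p.2.map (fun w => (p.1, w))) k
        = if p.1 = k then p.2 else [] := by
      by_cases hpk : p.1 = k
      · subst hpk; simp [egroup, List.filter_map, Function.comp]
      · simp [egroup, List.filter_map, Function.comp, hpk]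
    by_cases hpk : p.1 = k
    · have hg : egroup (flat g) k = [] := by
        refine egroup_nil_of_not_mem _ _ (fun h => hnd.1 ?_)
        rw [hpk]
        rcases List.mem_map.mp h with ⟨e, he, hk⟩
        exact hk ▸ flat_key_mem g e he
      rw [hblock, hg]
      simp [PySem.Dict.getD, PySem.Dict.get?, PySem.Dict.mk, List.find?, hpk]
    · rw [hblock, ih hnd.2]
      have hb : (p.1 == k) = false := by simp [hpk]
      simp [PySem.Dict.getD, PySem.Dict.get?, PySem.Dict.mk, List.find?, hb, hpk]

-- egroup of the reverse stream = B's gather comprehension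
theorem egroup_rflat (g : List (Int × List Int)) (k : Int) :
    egroup (rflat g) k
      = g.flatMap (fun p => (p.2.filter (fun x => x = k)).map (fun _ => p.1)) := by
  induction g with
  | nil => simp [rflat, egroup]
  | cons p g ih =>
    have hstep : rflat (p :: g) = p.2.map (fun w => (w, p.1)) ++ rflat g := by simp [rflat]
    rw [hstep, egroup_append, List.flatMap_cons, ih]
    congr 1
    simp [egroup, List.filter_map, List.map_map, Function.comp_def]

-- ===== VERDICT (by name: the statement is the Claim_ definition above) =====
theorem undirected_spec : Claim_equal_undirected := by
  intro g _ hpre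
  unfold Spec_undirected
  -- Step 1: A g = rawScatter [] (flat g ++ rflat g)
  have hA : undirected g = rawScatter [] (flat g ++ rflat g) := by
    simp only [undirected]
    have hgnd : (PySem.Dict.mk g).keys.Nodup := by
      simpa [PySem.Dict.keys] using hpre
    have hitems : (PySem.Dict.mk g).items = g := rfl
    rw [keysfold _ hgnd, keysfold _ hgnd, hitems]
    set U1A := List.foldl (fun acc p => List.foldl (fun u w =>
        if u.contains p.1 = true then u.modify p.1 [] (fun x => x ++ [w])
        else u.insert p.1 [w]) acc p.2) (PySem.Dict.empty : PySem.Dict Int (List Int)) g with hU1An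
    set REV := List.foldl (fun acc p => List.foldl (fun rev w =>
        if rev.contains w = true then rev.modify w [] (fun x => x ++ [p.1])
        else rev.insert w [p.1]) acc p.2) (PySem.Dict.empty : PySem.Dict Int (List Int)) g with hREVn
    set H := List.foldl (fun rev i => if rev.contains i = true then rev else rev.insert i [])
        REV (PySem.Dict.mk g).keys with hHn
    have hempnd : (PySem.Dict.empty : PySem.Dict Int (List Int)).keys.Nodup := by
      simp [PySem.Dict.keys, PySem.Dict.empty]
    have hU1 := nested_bridge g (fun v w => (v, w)) PySem.Dict.empty hempnd
    have hRev := nested_bridge g (fun v w => (w, v)) PySem.Dict.empty hempnd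
    have hU1items : U1A.items = rawScatter [] (flat g) := by
      rw [hU1An]; exact hU1.1
    have hU1nd : U1A.keys.Nodup := by rw [hU1An]; exact hU1.2
    have hRevItems : REV.items = rawScatter [] (rflat g) := by
      rw [hREVn]; exact hRev.1
    have hRevNd : REV.keys.Nodup := by rw [hREVn]; exact hRev.2
    have hpad := pad_bridge (PySem.Dict.mk g).keys REV hRevNd
    have hHnd : H.keys.Nodup := by rw [hHn]; exact hpad.1
    have hHflat : flat H.items = flat (rawScatter [] (rflat g)) := by
      rw [hHn, hpad.2, hRevItems]
    rw [keysfold H hHnd]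
    have hL : (H.items.foldl (fun acc p => p.2.foldl (fun u w =>
        if u.contains p.1 = true then u.modify p.1 [] (fun x => x ++ [w])
        else u.insert p.1 [w]) acc) U1A).items
        = rawScatter U1A.items (flat H.items) :=
      (nested_bridge H.items (fun v w => (v, w)) U1A hU1nd).1
    have hmid : rawScatter U1A.items (flat H.items)
        = rawScatter U1A.items (rflat g) := by
      rw [hHflat]
      exact (scatter_group (rflat g) [] U1A.items (by simp) (by simp)).symm
    rw [hL, hmid, hU1items, rawScatter_append]
  -- Step 2: B g = (fkeys [] (flat g ++ rflat g)).map (fun k => (k, egroup … k))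
  have hB : undirected_alt g
      = (fkeys [] (flat g ++ rflat g)).map (fun k => (k, egroup (flat g ++ rflat g) k)) := by
    simp only [undirected_alt]
    rw [fkeys_append, fkeys_flat g [] hpre (by simp)]
    rw [← bkeys_fkeys g]
    refine List.map_congr_left (fun k _ => ?_)
    rw [egroup_append, egroup_flat g k hpre, egroup_rflat g k]
  rw [hA, hB, gather_scatter]
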